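-- pv_equiv track=rewrite | github.com/weiyangzen/awesome_algorithms | Algorithms/计算机-动态规划-0074-单词拆分/demo.py | is_valid_segmentation
-- ===== SOURCE A (Python) =====
-- from typing import Iterable, Sequence
--
-- def is_valid_segmentation(
--     text: str,
--     word_dict: Iterable[str],
--     segments: Sequence[str],
--     can_break: bool,
-- ) -> bool:
--     word_set = set(word_dict)
--
--     if not can_break:
--         return len(segments) == 0
--
--     if text == "":
--         return len(segments) == 0
--
--     if len(segments) == 0:
--         return False
--     if any(seg == "" for seg in segments):
--         return False
--     if any(seg not in word_set for seg in segments):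
--         return False
--
--     return "".join(segments) == text
-- ===== SOURCE B (Python) =====
-- def is_valid_segmentation(text, word_dict, segments, can_break):
--     if not can_break or text == "":
--         return len(segments) == 0
--     words = set(word_dict)
--     rest = text
--     for seg in segments:
--         if seg == "" or seg not in words or not rest.startswith(seg):
--             return False
--         rest = rest[len(seg):]
--     return rest == ""
-- ===== Notes on version B (the rewrite author's own statement) =====
-- stated objective: alternative
-- what changed: Replaces the three separate any()-scans plus building ''.join(segments) and comparing it to text with a single prefix-walk over segments that checks each segment (nonempty, in the word set, prefix of the remaining text) and strips it off, finishing when the remainder is empty.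
import Mathlib
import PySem

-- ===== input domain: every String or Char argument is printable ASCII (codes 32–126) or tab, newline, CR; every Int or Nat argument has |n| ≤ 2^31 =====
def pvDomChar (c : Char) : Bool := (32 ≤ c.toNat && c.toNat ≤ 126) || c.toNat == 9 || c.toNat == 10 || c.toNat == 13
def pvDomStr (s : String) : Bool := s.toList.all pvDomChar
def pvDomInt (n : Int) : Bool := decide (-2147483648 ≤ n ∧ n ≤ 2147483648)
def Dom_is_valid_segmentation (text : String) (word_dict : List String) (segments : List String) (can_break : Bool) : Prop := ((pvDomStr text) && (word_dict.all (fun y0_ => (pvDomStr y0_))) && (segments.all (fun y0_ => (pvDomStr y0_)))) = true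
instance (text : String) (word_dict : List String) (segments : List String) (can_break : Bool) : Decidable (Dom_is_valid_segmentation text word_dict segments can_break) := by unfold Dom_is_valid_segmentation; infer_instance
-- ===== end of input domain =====

-- B replaces A's three any()-scans plus ''.join(segments)==text by a single prefix-walk that
-- strips each segment off the front of the remaining text; same cost, one traversal.

-- ===== PORT A =====
def is_valid_segmentation (text : String) (word_dict : List String) (segments : List String) (can_break : Bool) : Bool :=
  let word_set := PySem.Set.ofList word_dict
  if !can_break then segments.length == 0
  else if text == "" then segments.length == 0
  else if segments.length == 0 then false
  else if segments.any (fun seg => seg == "") then false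
  else if segments.any (fun seg => !(PySem.Set.contains word_set seg)) then false
  else PySem.Str.join "" segments == text

-- ===== PORT B =====
-- the loop of Source B: rest[len(seg):] with 0 ≤ len(seg) is exactly List.drop on the code points
def pvWalk (words : PySem.Set String) : List String → List Char → Bool
  | [], rest => rest == []
  | seg :: segs, rest =>
    if seg == "" || !(PySem.Set.contains words seg) || !(PySem.Chars.startswith rest seg.toList) then
      false
    else
      pvWalk words segs (rest.drop seg.toList.length)

def is_valid_segmentation_alt (text : String) (word_dict : List String) (segments : List String) (can_break : Bool) : Bool :=
  if !can_break || text == "" then segments.length == 0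
  else pvWalk (PySem.Set.ofList word_dict) segments text.toList

-- ===== PRECONDITION & SPEC =====
def Spec_is_valid_segmentation (text : String) (word_dict : List String) (segments : List String) (can_break : Bool) (out : Bool) : Prop := out = is_valid_segmentation_alt text word_dict segments can_break
instance (text : String) (word_dict : List String) (segments : List String) (can_break : Bool) (out : Bool) : Decidable (Spec_is_valid_segmentation text word_dict segments can_break out) := by unfold Spec_is_valid_segmentation; infer_instance

-- ===== CLAIM (what is proved, stated in full; the proofs are below) =====
def Claim_equal_is_valid_segmentation : Prop := ∀ (text : String) (word_dict : List String) (segments : List String) (can_break : Bool), Dom_is_valid_segmentation text word_dict segments can_break → Spec_is_valid_segmentation text word_dict segments can_break (is_valid_segmentation text word_dict segments can_break)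

-- ===== LEMMAS AND PROOFS =====

-- ''.join over code points is the flatten of the pieces
theorem pvJoin_nil_sep (l : List (List Char)) : PySem.Chars.join [] l = l.flatten := by
  induction l with
  | nil => rw [PySem.Chars.join_nil, List.flatten_nil]
  | cons a t ih =>
    cases t with
    | nil => rw [PySem.Chars.join_singleton]; simp
    | cons b r => rw [PySem.Chars.join_cons_cons, ih]; simp

-- characterisation of B's walk
theorem pvWalk_iff (words : PySem.Set String) (segs : List String) (rest : List Char) :
    pvWalk words segs rest = true ↔
      (∀ s ∈ segs, s ≠ "" ∧ s ∈ words) ∧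
        (segs.map String.toList).flatten = rest := by
  induction segs generalizing rest with
  | nil =>
    rw [pvWalk]
    simp only [beq_iff_eq, List.not_mem_nil, false_implies, implies_true, List.map_nil,
      List.flatten_nil, true_and]
    exact eq_comm
  | cons seg segs ih =>
    by_cases hg : (seg == "" || !(PySem.Set.contains words seg) || !(PySem.Chars.startswith rest seg.toList)) = true
    · rw [pvWalk, if_pos hg]
      simp only [Bool.or_eq_true, Bool.not_eq_true', beq_iff_eq] at hg
      constructor
      · intro h; exact absurd h (by simp)
      · rintro ⟨hall, hflat⟩
        have h1 := hall seg (List.mem_cons_self ..)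
        rcases hg with (h | h) | h
        · exact absurd h h1.1
        · exact absurd h1.2 (by simpa using h)
        · have : seg.toList <+: rest := ⟨(segs.map String.toList).flatten, by simpa using hflat⟩
          rw [← PySem.Chars.startswith_iff] at this
          simp [this] at h
    · rw [pvWalk, if_neg hg]
      simp only [Bool.or_eq_true, Bool.not_eq_true', beq_iff_eq, not_or, Bool.not_eq_false] at hg
      obtain ⟨⟨hne, hmem⟩, hsw⟩ := hg
      obtain ⟨t, ht⟩ := (PySem.Chars.startswith_iff rest seg.toList).1 hsw
      subst ht
      rw [ih]
      have hmem' : seg ∈ words := by simpa using hmem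
      simp [hne, hmem']

-- characterisation of A's final chain (can_break = true, text ≠ "")
theorem pvA_chain_iff (segs : List String) (text : String) :
    ((PySem.Str.join "" segs == text) = true ↔
      (segs.map String.toList).flatten = text.toList) := by
  rw [beq_iff_eq, String.ext_iff]
  simp [PySem.Str.toList_join, pvJoin_nil_sep]

-- ===== VERDICT (by name: the statement is the Claim_ definition above) =====
theorem is_valid_segmentation_spec : Claim_equal_is_valid_segmentation := by
  intro text word_dict segments can_break _
  unfold Spec_is_valid_segmentation is_valid_segmentation is_valid_segmentation_alt
  cases can_break with
  | false => simp
  | true =>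
    by_cases ht : text = ""
    · subst ht; rfl
    · have htl : text.toList ≠ [] := by
        intro h; exact ht (String.ext_iff.2 (by simp [h]))
      have htb : (text == "") = false := by simpa using ht
      simp only [Bool.not_true, Bool.false_or, htb, Bool.false_eq_true, if_false]
      rw [Bool.eq_iff_iff, pvWalk_iff]
      cases segments with
      | nil =>
        rw [if_pos (by simp)]
        simp only [List.map_nil, List.flatten_nil, List.not_mem_nil, false_implies, implies_true,
          true_and]
        constructor
        · intro h; cases h
        · intro h; exact absurd h.symm htl
      | cons a segs =>
        rw [if_neg (by simp : ¬ (((a :: segs).length == 0) = true))]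
        by_cases he : (a :: segs).any (fun seg => seg == "") = true
        · simp only [if_pos he]
          simp only [List.any_eq_true, beq_iff_eq] at he
          obtain ⟨s, hs, hse⟩ := he
          constructor
          · intro h; exact absurd h (by simp)
          · rintro ⟨hall, _⟩; exact absurd hse (hall s hs).1
        · simp only [if_neg he]
          by_cases hm : (a :: segs).any (fun seg => !(PySem.Set.contains (PySem.Set.ofList word_dict) seg)) = true
          · simp only [if_pos hm]
            simp only [List.any_eq_true, Bool.not_eq_true'] at hm
            obtain ⟨s, hs, hsm⟩ := hm
            constructor
            · intro h; exact absurd h (by simp)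
            · rintro ⟨hall, _⟩; exact absurd (hall s hs).2 (by simpa using hsm)
          · simp only [if_neg hm]
            rw [pvA_chain_iff]
            simp only [List.any_eq_true, beq_iff_eq, Bool.not_eq_true', not_exists, not_and,
              Bool.not_eq_false] at he hm
            constructor
            · intro h
              exact ⟨fun s hs => ⟨fun hc => (he s hs) (by simp [hc]), by simpa using hm s hs⟩, h⟩
            · rintro ⟨_, h⟩; exact h
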